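-- pv_equiv track=rewrite | github.com/Newb1e2007/CodeWars | CodeWars GitHub/Python/4kyu/Next smaller number with the same digits.py | next_smaller2
-- ===== SOURCE A (Python) =====
-- def next_smaller2(n):
--     s = list(str(n))
--     for i in range(len(s) - 2, -1, -1):
--
--         if s[i] > s[i + 1]:
--             t = s[i:]
--             m = max(filter(lambda x: x < t[0], t))
--             t.remove(m)
--             t.sort(reverse=True)
--             s[i:] = [m] + t
--             if int(s[0]) != 0:
--                 return int("".join(s))
--
--     return -1
-- ===== SOURCE B (Python) =====
-- def next_smaller2(n):
--     s = list(str(n))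
--     i = len(s) - 2
--     while i >= 0 and s[i] <= s[i + 1]:
--         i -= 1
--     if i < 0:
--         return -1
--     j = len(s) - 1
--     while s[j] >= s[i]:
--         j -= 1
--     s[i], s[j] = s[j], s[i]
--     s[i + 1:] = s[i + 1:][::-1]
--     return -1 if s[0] == '0' else int("".join(s))
-- ===== Notes on version B (the rewrite author's own statement) =====
-- stated objective: alternative
-- what changed: B finds the pivot, swaps it with the rightmost smaller suffix digit and reverses the (ascending) suffix in place -- the classic previous-permutation step -- instead of A's extract-max/remove/re-sort of the suffix inside a scanning loop.
import Mathlib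
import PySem

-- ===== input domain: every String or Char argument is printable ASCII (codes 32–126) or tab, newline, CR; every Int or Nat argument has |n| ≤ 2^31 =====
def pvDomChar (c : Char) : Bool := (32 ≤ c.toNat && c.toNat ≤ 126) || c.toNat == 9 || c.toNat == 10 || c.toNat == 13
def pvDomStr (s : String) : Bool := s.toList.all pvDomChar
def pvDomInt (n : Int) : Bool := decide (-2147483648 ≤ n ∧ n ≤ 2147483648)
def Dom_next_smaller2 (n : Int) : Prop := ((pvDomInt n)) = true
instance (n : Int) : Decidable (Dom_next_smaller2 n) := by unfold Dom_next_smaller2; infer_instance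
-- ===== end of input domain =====

-- B replaces A's extract-max/remove/re-sort of the suffix by the classic previous-permutation
-- step: swap the pivot with the rightmost smaller suffix digit and reverse the suffix.
-- Equivalence is proved for all n ≥ 0 (Pre_); on negative n A raises ValueError whenever the
-- digits of |n| contain an adjacent descent (int('-') in the splice branch).

-- ===== PORT A =====
-- the body of A's descent branch up to the splice 's[i:] = [m] + t'
def spliceA (s : List Char) (i : Nat) : List Char :=
  let t := s.drop i
  let m := (PySem.List.max? (t.filter (fun x => decide (x < t.headD ' '))) (fun x => x)).getD ' '
  let t1 := (PySem.List.remove? t m).getD []          -- t.remove(m); m is always present here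
  let t2 := PySem.List.sorted t1 (fun x => x) true    -- t.sort(reverse=True)
  s.take i ++ m :: t2

-- 'for i in range(len(s) - 2, -1, -1)', counting i down; note A keeps scanning the modified s
-- when the leading-zero test fails (which can only happen at i = 0 for n ≥ 0)
def loopA (s : List Char) : Nat → Int
  | 0 =>
    if s.getD 1 ' ' < s.getD 0 ' ' then
      let s' := spliceA s 0
      -- int(s[0]) != 0 : ported via PySem.Int.ofChars?; exact when s'[0] is a digit (all n ≥ 0)
      if (PySem.Int.ofChars? [s'.headD ' ']).getD 0 ≠ 0 then (PySem.Int.ofChars? s').getD 0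
      else -1
    else -1
  | i+1 =>
    if s.getD (i+2) ' ' < s.getD (i+1) ' ' then
      let s' := spliceA s (i+1)
      if (PySem.Int.ofChars? [s'.headD ' ']).getD 0 ≠ 0 then (PySem.Int.ofChars? s').getD 0
      else loopA s' i
    else loopA s i

def next_smaller2 (n : Int) : Int :=
  let s := PySem.Int.toChars n
  if 2 ≤ s.length then loopA s (s.length - 2) else -1   -- range(len(s)-2,-1,-1) is empty for len(s) < 2

-- ===== PORT B =====
-- 'while i >= 0 and s[i] <= s[i+1]: i -= 1', fuel k = i+1
def pivotB (s : List Char) : Nat → Option Nat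
  | 0 => none
  | k+1 => if s.getD k ' ' ≤ s.getD (k+1) ' ' then pivotB s k else some k

-- 'j = len(s)-1; while s[j] >= s[i]: j -= 1', fuel k = j+1
def jB (s : List Char) (p : Char) : Nat → Nat
  | 0 => 0
  | k+1 => if p ≤ s.getD k ' ' then jB s p k else k

def finishB (s : List Char) (i : Nat) : Int :=
  let j := jB s (s.getD i ' ') s.length
  let s1 := (s.set i (s.getD j ' ')).set j (s.getD i ' ')   -- s[i], s[j] = s[j], s[i]
  let s2 := s1.take (i+1) ++ (s1.drop (i+1)).reverse        -- s[i+1:] = s[i+1:][::-1]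
  if s2.headD ' ' = '0' then -1 else (PySem.Int.ofChars? s2).getD 0

def next_smaller2_alt (n : Int) : Int :=
  let s := PySem.Int.toChars n
  match pivotB s (s.length - 1) with
  | none => -1
  | some i => finishB s i

-- ===== PRECONDITION & SPEC =====
-- Pre_ excludes exactly the inputs on which A raises: negative n whose digit string contains an
-- adjacent descent — there A's branch fires and int(s[0]) hits the '-' sign, a ValueError.
def Pre_next_smaller2 (n : Int) : Prop := 0 ≤ n ∨ List.IsChain (· ≤ ·) (PySem.Int.toChars n)
instance (n : Int) : Decidable (Pre_next_smaller2 n) := by unfold Pre_next_smaller2; infer_instance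
def pvWitness_next_smaller2 : Int := 531

def Spec_next_smaller2 (n : Int) (out : Int) : Prop := out = next_smaller2_alt n
instance (n : Int) (out : Int) : Decidable (Spec_next_smaller2 n out) := by unfold Spec_next_smaller2; infer_instance

-- ===== CLAIM (what is proved, stated in full; the proofs are below) =====
def Claim_equal_next_smaller2 : Prop := ∀ (n : Int), Dom_next_smaller2 n → Pre_next_smaller2 n → Spec_next_smaller2 n (next_smaller2 n)

-- ===== LEMMAS AND PROOFS =====

-- str(m) for a natural m, most significant digit first
def repNat (m : Nat) : List Char :=
  if m = 0 then ['0'] else ((Nat.digits 10 m).map Nat.digitChar).reverse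

theorem toDigitsCore_eq (fuel : Nat) : ∀ (m : Nat) (acc : List Char), m < fuel →
    Nat.toDigitsCore 10 fuel m acc = repNat m ++ acc := by
  induction fuel with
  | zero => intro m acc h; omega
  | succ fuel ih =>
    intro m acc h
    show (if m / 10 = 0 then (m % 10).digitChar :: acc
          else Nat.toDigitsCore 10 fuel (m / 10) ((m % 10).digitChar :: acc)) = repNat m ++ acc
    by_cases h0 : m / 10 = 0
    · rw [if_pos h0]
      by_cases hm : m = 0
      · subst hm; simp [repNat]; decide
      · have hlt : m < 10 := by omega
        have : Nat.digits 10 m = [m] := by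
          rw [Nat.digits_def' (by norm_num : (1:Nat) < 10) (by omega), h0, Nat.digits_zero,
            Nat.mod_eq_of_lt hlt]
        simp [repNat, hm, this, Nat.mod_eq_of_lt hlt]
    · rw [if_neg h0]
      have hm : m ≠ 0 := by omega
      have hdiv : m / 10 < fuel := by
        have := Nat.div_lt_self (by omega : 0 < m) (by norm_num : 1 < 10); omega
      rw [ih (m / 10) _ hdiv]
      have hd : Nat.digits 10 m = m % 10 :: Nat.digits 10 (m / 10) :=
        Nat.digits_def' (by norm_num) (by omega)
      simp [repNat, hm, h0, hd]

theorem toChars_nonneg (n : Int) (h : 0 ≤ n) : PySem.Int.toChars n = repNat n.toNat := by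
  show (if n < 0 then '-' :: Nat.toDigits 10 n.natAbs else Nat.toDigits 10 n.toNat) = _
  rw [if_neg (by omega)]
  show Nat.toDigitsCore 10 (n.toNat + 1) n.toNat [] = _
  rw [toDigitsCore_eq _ _ _ (Nat.lt_succ_self _), List.append_nil]

theorem repNat_mem (m : Nat) : ∀ c ∈ repNat m, ∃ k, k < 10 ∧ c = Nat.digitChar k := by
  intro c hc
  unfold repNat at hc
  by_cases hm : m = 0
  · simp [hm] at hc; exact ⟨0, by norm_num, by simp [hc]; rfl⟩
  · rw [if_neg hm, List.mem_reverse, List.mem_map] at hc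
    obtain ⟨d, hd, rfl⟩ := hc
    exact ⟨d, Nat.digits_lt_base (by norm_num) hd, rfl⟩

theorem repNat_head (m : Nat) (h : 2 ≤ (repNat m).length) :
    ∃ k, 0 < k ∧ k < 10 ∧ (repNat m).headD ' ' = Nat.digitChar k := by
  have hm : m ≠ 0 := by
    intro hm; subst hm; simp [repNat] at h
  have hne : Nat.digits 10 m ≠ [] := Nat.digits_ne_nil_iff_ne_zero.mpr hm
  refine ⟨(Nat.digits 10 m).getLast hne, ?_, ?_, ?_⟩
  · have := Nat.getLast_digit_ne_zero 10 hm; omega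
  · exact Nat.digits_lt_base (by norm_num) (List.getLast_mem hne)
  · unfold repNat
    rw [if_neg hm]
    rw [List.headD_eq_head?_getD, List.head?_reverse,
      List.getLast?_eq_getLast (h := by simp [hne]), Option.getD_some, List.getLast_map]

-- int(c) != 0  ↔  c != '0' for a digit char
theorem digit_check (k : Nat) (hk : k < 10) :
    ((PySem.Int.ofChars? [Nat.digitChar k]).getD 0 ≠ 0) ↔ Nat.digitChar k ≠ '0' := by
  interval_cases k <;> decide

theorem digitChar_ne_zero (k : Nat) (h0 : 0 < k) (hk : k < 10) : Nat.digitChar k ≠ '0' := by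
  interval_cases k <;> decide

theorem sorted_le_getLast {l : List Char} (hs : List.Pairwise (· ≤ ·) l) (h : l ≠ []) :
    ∀ x ∈ l, x ≤ l.getLast h := by
  induction l with
  | nil => simp at h
  | cons a t ih =>
    intro x hx
    rcases eq_or_ne t [] with ht | ht
    · subst ht; simp at hx; simp [hx]
    · rw [List.getLast_cons ht]
      rcases List.mem_cons.mp hx with rfl | hxt
      · exact le_trans (List.rel_of_pairwise_cons hs (List.getLast_mem ht)) (le_refl _)
      · exact ih (List.Pairwise.of_cons hs) ht x hxt

theorem max_sorted {l : List Char} (hs : List.Pairwise (· ≤ ·) l) (h : l ≠ []) :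
    PySem.List.max? l (fun x => x) = some (l.getLast h) := by
  obtain ⟨m, hm⟩ : ∃ m, PySem.List.max? l (fun x => x) = some m := by
    cases hmax : PySem.List.max? l (fun x => x) with
    | none => exact absurd ((PySem.List.max?_eq_none_iff l _).mp hmax) h
    | some m => exact ⟨m, rfl⟩
  rw [hm]
  have h1 : m ≤ l.getLast h := sorted_le_getLast hs h m (PySem.List.max?_mem hm)
  have h2 : l.getLast h ≤ m := PySem.List.max?_isMax hm _ (List.getLast_mem h)
  rw [le_antisymm h1 h2]

theorem jB_eq (s : List Char) (a : Char) (j : Nat) :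
    ∀ fuel, j < fuel → s.getD j ' ' < a → (∀ k, j < k → k < fuel → a ≤ s.getD k ' ') →
    jB s a fuel = j := by
  intro fuel
  induction fuel with
  | zero => omega
  | succ fuel ih =>
    intro hj hlt hup
    show (if a ≤ s.getD fuel ' ' then jB s a fuel else fuel) = j
    by_cases hk : a ≤ s.getD fuel ' '
    · rw [if_pos hk]
      have hjf : j ≠ fuel := by intro h; subst h; exact absurd hk (not_le.mpr hlt)
      exact ih (by omega) hlt (fun k h1 h2 => hup k h1 (by omega))
    · rw [if_neg hk]
      by_cases hjf : j = fuel
      · omega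
      · exact absurd (hup fuel (by omega) (by omega)) hk

-- the heart: on pre ++ a :: (u1 ++ u2) with u1 < a ≤ u2, both suffix rearrangements agree
theorem splice_eq (pre u1 u2 : List Char) (a : Char) (hu1 : u1 ≠ [])
    (h1 : ∀ x ∈ u1, x < a) (h2 : ∀ x ∈ u2, a ≤ x)
    (hs1 : List.Pairwise (· ≤ ·) u1) (hs2 : List.Pairwise (· ≤ ·) u2) :
    spliceA (pre ++ a :: (u1 ++ u2)) pre.length
      = pre ++ u1.getLast hu1 :: (u2.reverse ++ a :: u1.dropLast.reverse) := by
  have hm_mem : u1.getLast hu1 ∈ u1 := List.getLast_mem hu1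
  have hma : u1.getLast hu1 < a := h1 _ hm_mem
  simp only [spliceA]
  rw [List.drop_left]
  have hfilter : (a :: (u1 ++ u2)).filter (fun x => decide (x < (a :: (u1 ++ u2)).headD ' ')) = u1 := by
    simp only [List.headD_cons, List.filter_cons, decide_eq_true_eq, lt_irrefl, if_false,
      List.filter_append]
    rw [List.filter_eq_self.mpr (fun x hx => by simpa using h1 x hx),
      List.filter_eq_nil_iff.mpr (fun x hx => by simpa using not_lt.mpr (h2 x hx)), List.append_nil]
  rw [hfilter, max_sorted hs1 hu1, Option.getD_some]
  have hmem_t : u1.getLast hu1 ∈ a :: (u1 ++ u2) :=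
    List.mem_cons_of_mem _ (List.mem_append_left _ hm_mem)
  rw [PySem.List.remove?_eq_some_erase _ _ hmem_t, Option.getD_some]
  have herase : (a :: (u1 ++ u2)).erase (u1.getLast hu1)
      = a :: (u1.erase (u1.getLast hu1) ++ u2) := by
    rw [List.erase_cons_tail (by simpa using (ne_of_lt hma).symm), List.erase_append_left _ hm_mem]
  rw [herase, List.take_left]
  congr 1
  congr 1
  -- sorted(t1, reverse=True) equals the explicit descending arrangement
  have hperm_erase : (u1.erase (u1.getLast hu1)).Perm u1.dropLast := by
    have h1p : u1.Perm (u1.getLast hu1 :: u1.erase (u1.getLast hu1)) := List.perm_cons_erase hm_mem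
    have h2p : u1.Perm (u1.getLast hu1 :: u1.dropLast) := by
      conv_lhs => rw [← List.dropLast_append_getLast hu1]
      exact List.perm_append_singleton _ _
    exact List.Perm.cons_inv (h1p.symm.trans h2p)
  have hpz : (a :: (u1.erase (u1.getLast hu1) ++ u2)).Perm
      (u2.reverse ++ a :: u1.dropLast.reverse) := by
    refine List.Perm.trans ?_ (List.perm_append_comm)
    show _root_.List.Perm _ ((a :: u1.dropLast.reverse) ++ u2.reverse)
    simp only [List.cons_append]
    exact List.Perm.cons a ((hperm_erase.trans (u1.dropLast.reverse_perm).symm).append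
      (u2.reverse_perm).symm)
  have hsz : List.Pairwise (fun x y : Char => y ≤ x) (u2.reverse ++ a :: u1.dropLast.reverse) := by
    rw [List.pairwise_append]
    refine ⟨List.pairwise_reverse.mpr hs2, ?_, ?_⟩
    · rw [List.pairwise_cons]
      refine ⟨fun x hx => ?_, List.pairwise_reverse.mpr (hs1.sublist (List.dropLast_sublist _))⟩
      exact le_of_lt (h1 x (List.dropLast_subset _ (List.mem_reverse.mp hx)))
    · intro x hx y hy
      have hax : a ≤ x := h2 x (List.mem_reverse.mp hx)
      rcases List.mem_cons.mp hy with rfl | hy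
      · exact hax
      · exact le_trans (le_of_lt (h1 y (List.dropLast_subset _ (List.mem_reverse.mp hy)))) hax
  exact List.eq_of_perm_of_sorted (fun x y _ _ hxy hyx => le_antisymm hyx hxy)
    (PySem.List.sorted_pairwise_rev _ _) hsz
    ((PySem.List.sorted_perm _ _ _).trans hpz)

theorem finish_eq (pre u1 u2 : List Char) (a : Char) (hu1 : u1 ≠ [])
    (h1 : ∀ x ∈ u1, x < a) (h2 : ∀ x ∈ u2, a ≤ x) :
    finishB (pre ++ a :: (u1 ++ u2)) pre.length
      = (let s2 := pre ++ u1.getLast hu1 :: (u2.reverse ++ a :: u1.dropLast.reverse);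
         if s2.headD ' ' = '0' then -1 else (PySem.Int.ofChars? s2).getD 0) := by
  have hm_mem : u1.getLast hu1 ∈ u1 := List.getLast_mem hu1
  have hma : u1.getLast hu1 < a := h1 _ hm_mem
  have hlen1 : 0 < u1.length := List.length_pos_iff.mpr hu1
  have g1 : (pre ++ a :: (u1 ++ u2)).getD pre.length ' ' = a := by
    rw [List.getD_eq_getElem?_getD, List.getElem?_append_right (le_refl _)]
    simp
  have g2 : ∀ r : Nat, (pre ++ a :: (u1 ++ u2)).getD (pre.length + 1 + r) ' '
      = (u1 ++ u2).getD r ' ' := by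
    intro r
    rw [List.getD_eq_getElem?_getD, List.getElem?_append_right (by omega)]
    have hr : pre.length + 1 + r - pre.length = r + 1 := by omega
    rw [hr]
    simp [List.getD_eq_getElem?_getD]
  have gj : (pre ++ a :: (u1 ++ u2)).getD (pre.length + u1.length) ' ' = u1.getLast hu1 := by
    have he : pre.length + u1.length = pre.length + 1 + (u1.length - 1) := by omega
    rw [he, g2]
    rw [List.getD_eq_getElem?_getD, List.getElem?_append_left (by omega),
      List.getElem?_eq_getElem (by omega), Option.getD_some, List.getLast_eq_getElem]
  have hj : jB (pre ++ a :: (u1 ++ u2)) a (pre ++ a :: (u1 ++ u2)).length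
      = pre.length + u1.length := by
    apply jB_eq
    · simp only [List.length_append, List.length_cons]; omega
    · rw [gj]; exact hma
    · intro k hk1 hk2
      simp only [List.length_append, List.length_cons] at hk2
      have hk : k = pre.length + 1 + (k - pre.length - 1) := by omega
      rw [hk, g2]
      rw [List.getD_eq_getElem?_getD, List.getElem?_append_right (by omega),
        List.getElem?_eq_getElem (by omega), Option.getD_some]
      exact h2 _ (List.getElem_mem _)
  have hset1 : (pre ++ a :: (u1 ++ u2)).set pre.length (u1.getLast hu1)
      = pre ++ u1.getLast hu1 :: (u1 ++ u2) := by
    rw [List.set_append, if_neg (lt_irrefl _)]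
    simp
  have hset_last : u1.set (u1.length - 1) a = u1.dropLast ++ [a] := by
    have hsplit : u1.set (u1.length - 1) a
        = (u1.dropLast ++ [u1.getLast hu1]).set (u1.length - 1) a := by
      rw [List.dropLast_append_getLast]
    rw [hsplit, List.set_append, if_neg (by simp [List.length_dropLast]),
      show u1.length - 1 - u1.dropLast.length = 0 by simp [List.length_dropLast]]
    rfl
  have hset2 : (pre ++ u1.getLast hu1 :: (u1 ++ u2)).set (pre.length + u1.length) a
      = pre ++ u1.getLast hu1 :: (u1.dropLast ++ a :: u2) := by
    rw [List.set_append, if_neg (by omega)]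
    have he : pre.length + u1.length - pre.length = (u1.length - 1) + 1 := by omega
    rw [he, List.set_cons_succ]
    rw [List.set_append, if_pos (by omega), hset_last]
    simp
  have htake : ∀ (c : Char) (v : List Char),
      (pre ++ c :: v).take (pre.length + 1) = pre ++ [c] := by
    intro c v
    rw [show pre ++ c :: v = (pre ++ [c]) ++ v by simp, List.take_left' (by simp)]
  have hdrop : ∀ (c : Char) (v : List Char),
      (pre ++ c :: v).drop (pre.length + 1) = v := by
    intro c v
    rw [show pre ++ c :: v = (pre ++ [c]) ++ v by simp, List.drop_left' (by simp)]
  simp only [finishB, g1, hj, gj, hset1, hset2, htake, hdrop]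
  simp [List.reverse_append]

-- descent at i: A's branch body computes exactly finishB's list
theorem descent_case (s : List Char) (i : Nat) (hlen : i + 2 ≤ s.length)
    (hsort : List.Pairwise (· ≤ ·) (s.drop (i+1)))
    (hc : s.getD (i+1) ' ' < s.getD i ' ') :
    finishB s i = (if (spliceA s i).headD ' ' = '0' then -1
                   else (PySem.Int.ofChars? (spliceA s i)).getD 0)
    ∧ (spliceA s i).headD ' ' ∈ s
    ∧ (0 < i → (spliceA s i).headD ' ' = s.headD ' ') := by
  have hi : i < s.length := by omega
  have hi1 : i + 1 < s.length := by omega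
  -- decompose s = pre ++ a :: (u1 ++ u2)
  have hdecomp : s = s.take i ++ s.getD i ' ' :: s.drop (i+1) := by
    conv_lhs => rw [← List.take_append_drop i s]
    rw [List.drop_eq_getElem_cons hi, List.getD_eq_getElem _ _ hi]
  have hprelen : (s.take i).length = i := by simp [List.length_take]; omega
  have huhead : (s.drop (i+1)).headD ' ' = s.getD (i+1) ' ' := by
    rw [List.headD_eq_head?_getD, List.head?_eq_getElem?, List.getElem?_drop,
      List.getD_eq_getElem?_getD, Nat.add_zero]
  set a := s.getD i ' ' with ha
  set u := s.drop (i+1) with hu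
  set u1 := u.takeWhile (fun x => decide (x < a)) with hu1def
  set u2 := u.dropWhile (fun x => decide (x < a)) with hu2def
  have husplit : u = u1 ++ u2 := (List.takeWhile_append_dropWhile).symm
  have hu_ne : u ≠ [] := by
    rw [hu]
    intro h
    have := congrArg List.length h
    simp at this
    omega
  have hu1 : u1 ≠ [] := by
    obtain ⟨b, u', hbu⟩ := List.exists_cons_of_ne_nil hu_ne
    have hb : b = s.getD (i+1) ' ' := by rw [← huhead, hbu]; rfl
    rw [hu1def, hbu, List.takeWhile_cons, if_pos (by simp [hb]; exact hc)]
    simp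
  have h1 : ∀ x ∈ u1, x < a := fun x hx => by simpa using List.mem_takeWhile_imp hx
  have h2 : ∀ x ∈ u2, a ≤ x := by
    intro x hx
    have hs2 : List.Pairwise (· ≤ ·) u2 := hsort.sublist (List.dropWhile_sublist _)
    cases hu2c : u2 with
    | nil => rw [hu2c] at hx; simp at hx
    | cons b t =>
      have hb : a ≤ b := by
        have := List.head?_dropWhile_not (fun x => decide (x < a)) u
        rw [← hu2def, hu2c] at this
        simpa using this
      rw [hu2c] at hx hs2
      rcases List.mem_cons.mp hx with rfl | hxt
      · exact hb
      · exact le_trans hb (List.rel_of_pairwise_cons hs2 hxt)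
  have hs1 : List.Pairwise (· ≤ ·) u1 := hsort.sublist (List.takeWhile_sublist _)
  have hs' : s.take i ++ a :: (u1 ++ u2) = s := by rw [← husplit]; exact hdecomp.symm
  have hsA : spliceA s i
      = s.take i ++ u1.getLast hu1 :: (u2.reverse ++ a :: u1.dropLast.reverse) := by
    have h := splice_eq (s.take i) u1 u2 a hu1 h1 h2 hs1
      (hsort.sublist (List.dropWhile_sublist _))
    rw [hprelen, hs'] at h
    exact h
  have hsF : finishB s i
      = (let s2 := s.take i ++ u1.getLast hu1 :: (u2.reverse ++ a :: u1.dropLast.reverse);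
         if s2.headD ' ' = '0' then -1 else (PySem.Int.ofChars? s2).getD 0) := by
    have h := finish_eq (s.take i) u1 u2 a hu1 h1 h2
    rw [hprelen, hs'] at h
    exact h
  refine ⟨by rw [hsF, hsA], ?_, ?_⟩
  · rw [hsA]
    rcases hp : s.take i with _ | ⟨p, ps⟩
    · simp only [List.nil_append, List.headD_cons]
      have hmem : u1.getLast hu1 ∈ u := husplit ▸ List.mem_append_left _ (List.getLast_mem hu1)
      have hsub : u ⊆ s := by rw [hu]; exact List.drop_subset _ _
      exact hsub hmem
    · simp only [List.cons_append, List.headD_cons]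
      exact List.take_subset i s (by rw [hp]; exact List.mem_cons_self)
  · intro hpos
    rw [hsA]
    conv_rhs => rw [hdecomp]
    rcases hp : s.take i with _ | ⟨p, ps⟩
    · exfalso; rw [hp] at hprelen; simp at hprelen; omega
    · simp

theorem loop_main (i : Nat) : ∀ (s : List Char), i + 2 ≤ s.length →
    (∀ c ∈ s, ∃ k, k < 10 ∧ c = Nat.digitChar k) →
    (∃ k, 0 < k ∧ k < 10 ∧ s.headD ' ' = Nat.digitChar k) →
    List.Pairwise (· ≤ ·) (s.drop (i+1)) →
    loopA s i = (match pivotB s (i+1) with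
                 | none => -1
                 | some p => finishB s p) := by
  induction i with
  | zero =>
    intro s hlen hdig hhead hsort
    have hA : loopA s 0
        = (if s.getD 1 ' ' < s.getD 0 ' ' then
             (if (PySem.Int.ofChars? [(spliceA s 0).headD ' ']).getD 0 ≠ 0 then
                (PySem.Int.ofChars? (spliceA s 0)).getD 0
              else -1)
           else -1) := rfl
    have hP : pivotB s 1 = (if s.getD 0 ' ' ≤ s.getD 1 ' ' then none else some 0) := rfl
    rw [hA, hP]
    by_cases hc : s.getD 1 ' ' < s.getD 0 ' '
    · rw [if_pos hc, if_neg (not_le.mpr hc)]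
      obtain ⟨hfin, hmem, _⟩ := descent_case s 0 hlen hsort hc
      obtain ⟨k, hk, hck⟩ := hdig _ hmem
      have hcond : ((PySem.Int.ofChars? [(spliceA s 0).headD ' ']).getD 0 ≠ 0)
          ↔ (spliceA s 0).headD ' ' ≠ '0' := by
        rw [hck]; exact digit_check k hk
      show _ = finishB s 0
      rw [hfin]
      by_cases hz : (spliceA s 0).headD ' ' = '0'
      · rw [if_pos hz, if_neg (fun h => (hcond.mp h) hz)]
      · rw [if_neg hz, if_pos (hcond.mpr hz)]
    · rw [if_neg hc, if_pos (not_lt.mp hc)]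
  | succ i ih =>
    intro s hlen hdig hhead hsort
    have hA : loopA s (i+1)
        = (if s.getD (i+2) ' ' < s.getD (i+1) ' ' then
             (if (PySem.Int.ofChars? [(spliceA s (i+1)).headD ' ']).getD 0 ≠ 0 then
                (PySem.Int.ofChars? (spliceA s (i+1))).getD 0
              else loopA (spliceA s (i+1)) i)
           else loopA s i) := rfl
    have hP : pivotB s (i+1+1)
        = (if s.getD (i+1) ' ' ≤ s.getD (i+2) ' ' then pivotB s (i+1) else some (i+1)) := rfl
    rw [hA, hP]
    by_cases hc : s.getD (i+2) ' ' < s.getD (i+1) ' '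
    · rw [if_pos hc, if_neg (not_le.mpr hc)]
      obtain ⟨hfin, hmem, hhd⟩ := descent_case s (i+1) hlen hsort hc
      obtain ⟨k, hk0, hk, hck⟩ := hhead
      have hz : (spliceA s (i+1)).headD ' ' ≠ '0' := by
        rw [hhd (Nat.succ_pos i), hck]; exact digitChar_ne_zero k hk0 hk
      obtain ⟨k', hk', hck'⟩ := hdig _ hmem
      have hcond : ((PySem.Int.ofChars? [(spliceA s (i+1)).headD ' ']).getD 0 ≠ 0) := by
        rw [hck'] at hz ⊢
        exact (digit_check k' hk').mpr hz
      show _ = finishB s (i+1)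
      rw [hfin, if_pos hcond, if_neg hz]
    · rw [if_neg hc, if_pos (not_lt.mp hc)]
      have hlen' : i + 2 ≤ s.length := by omega
      have hi1 : i + 1 < s.length := by omega
      have hi2 : i + 2 < s.length := by omega
      have hdropc : s.drop (i+1) = s[i+1] :: s.drop (i+2) := List.drop_eq_getElem_cons hi1
      have hdropc2 : s.drop (i+2) = s[i+2] :: s.drop (i+3) := List.drop_eq_getElem_cons hi2
      have hle : s[i+1] ≤ s[i+2] := by
        have := not_lt.mp hc
        rwa [List.getD_eq_getElem _ _ hi2, List.getD_eq_getElem _ _ hi1] at this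
      have hsort' : List.Pairwise (· ≤ ·) (s.drop (i+1)) := by
        rw [hdropc]
        refine List.pairwise_cons.mpr ⟨?_, hsort⟩
        intro x hx
        rw [hdropc2] at hx hsort
        rcases List.mem_cons.mp hx with rfl | hxt
        · exact hle
        · exact le_trans hle (List.rel_of_pairwise_cons hsort hxt)
      exact ih s hlen' hdig hhead hsort'

theorem pairwise_short (l : List Char) (h : l.length ≤ 1) : List.Pairwise (· ≤ ·) l := by
  match l, h with
  | [], _ => exact List.Pairwise.nil
  | [x], _ => simp

theorem chain_getD (s : List Char) (hch : List.IsChain (· ≤ ·) s) :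
    ∀ k, k + 1 < s.length → s.getD k ' ' ≤ s.getD (k+1) ' ' := by
  intro k hk
  rw [List.getD_eq_getElem _ _ (by omega), List.getD_eq_getElem _ _ hk]
  exact List.isChain_iff_getElem.mp hch k hk

theorem chain_loopA (i : Nat) : ∀ (s : List Char), i + 2 ≤ s.length →
    List.IsChain (· ≤ ·) s → loopA s i = -1 := by
  induction i with
  | zero =>
    intro s hlen hch
    have hA : loopA s 0
        = (if s.getD 1 ' ' < s.getD 0 ' ' then
             (if (PySem.Int.ofChars? [(spliceA s 0).headD ' ']).getD 0 ≠ 0 then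
                (PySem.Int.ofChars? (spliceA s 0)).getD 0
              else -1)
           else -1) := rfl
    rw [hA, if_neg (not_lt.mpr (chain_getD s hch 0 (by omega)))]
  | succ i ih =>
    intro s hlen hch
    have hA : loopA s (i+1)
        = (if s.getD (i+2) ' ' < s.getD (i+1) ' ' then
             (if (PySem.Int.ofChars? [(spliceA s (i+1)).headD ' ']).getD 0 ≠ 0 then
                (PySem.Int.ofChars? (spliceA s (i+1))).getD 0
              else loopA (spliceA s (i+1)) i)
           else loopA s i) := rfl
    rw [hA, if_neg (not_lt.mpr (chain_getD s hch (i+1) (by omega)))]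
    exact ih s (by omega) hch

theorem chain_pivotB (s : List Char) (hch : List.IsChain (· ≤ ·) s) :
    ∀ fuel, fuel + 1 ≤ s.length → pivotB s fuel = none := by
  intro fuel
  induction fuel with
  | zero => intro _; rfl
  | succ k ih =>
    intro h
    show (if s.getD k ' ' ≤ s.getD (k+1) ' ' then pivotB s k else some k) = none
    rw [if_pos (chain_getD s hch k (by omega))]
    exact ih (by omega)

-- ===== VERDICT (by name: the statement is the Claim_ definition above) =====
theorem next_smaller2_spec : Claim_equal_next_smaller2 := by
  intro n hdom hpre
  show next_smaller2 n = next_smaller2_alt n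
  rcases hpre with hpre' | hch
  case inr =>
    simp only [next_smaller2, next_smaller2_alt]
    by_cases h2 : 2 ≤ (PySem.Int.toChars n).length
    · rw [if_pos h2, chain_loopA _ _ (by omega) hch, chain_pivotB _ hch _ (by omega)]
    · rw [if_neg h2, show (PySem.Int.toChars n).length - 1 = 0 from by omega]
      rfl
  simp only [next_smaller2, next_smaller2_alt, toChars_nonneg n hpre']
  by_cases h2 : 2 ≤ (repNat n.toNat).length
  · rw [if_pos h2]
    have hsort : List.Pairwise (· ≤ ·)
        ((repNat n.toNat).drop ((repNat n.toNat).length - 2 + 1)) := by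
      apply pairwise_short
      simp [List.length_drop]; omega
    rw [loop_main ((repNat n.toNat).length - 2) (repNat n.toNat) (by omega) (repNat_mem _)
      (repNat_head _ h2) hsort,
      show (repNat n.toNat).length - 2 + 1 = (repNat n.toNat).length - 1 from by omega]
  · rw [if_neg h2]
    rw [show (repNat n.toNat).length - 1 = 0 from by omega]
    rfl
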